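-- pv_equiv track=rewrite | github.com/0choki0/algo | 프로그래머스/0/181887. 홀수 vs 짝수/홀수 vs 짝수.py | solution
-- ===== SOURCE A (Python) =====
-- def solution(num_list):
--     eo = 1
--     odd = 0
--     even = 0
--     for i in num_list:
--         if eo == 1:
--             odd += i
--             eo = 2
--         else:
--             even += i
--             eo = 1
--
--     return max(odd, even)
-- ===== SOURCE B (Python) =====
-- def solution(num_list):
--     return max(sum(num_list[::2]), sum(num_list[1::2]))
-- ===== Notes on version B (the rewrite author's own statement) =====
-- stated objective: idiomatic
-- what changed: Replaces the single interleaved loop with a parity flag and two accumulators by two strided slices summed separately and a max.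
import Mathlib
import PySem

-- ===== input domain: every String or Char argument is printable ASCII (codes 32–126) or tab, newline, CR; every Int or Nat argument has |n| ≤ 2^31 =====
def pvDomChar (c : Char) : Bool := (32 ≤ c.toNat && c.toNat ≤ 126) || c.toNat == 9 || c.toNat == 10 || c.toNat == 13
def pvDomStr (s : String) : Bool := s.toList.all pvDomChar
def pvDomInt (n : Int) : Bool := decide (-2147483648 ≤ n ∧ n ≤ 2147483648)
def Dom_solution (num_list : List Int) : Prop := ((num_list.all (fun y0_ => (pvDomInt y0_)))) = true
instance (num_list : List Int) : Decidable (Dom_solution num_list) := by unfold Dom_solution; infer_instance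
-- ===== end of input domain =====

-- B replaces A's flag-toggling single loop with two strided slices summed separately (idiomatic decomposition).


-- ===== PORT A =====
def solution (num_list : List Int) : Int :=
  let st := num_list.foldl
    (fun (s : Int × Int × Int) i =>
      if s.1 == 1 then (2, s.2.1 + i, s.2.2) else (1, s.2.1, s.2.2 + i))
    (1, 0, 0)
  max st.2.1 st.2.2

-- ===== PORT B =====
def solution_alt (num_list : List Int) : Int :=
  max ((PySem.List.slice? num_list none none 2).getD []).sum
      ((PySem.List.slice? num_list (some 1) none 2).getD []).sum

-- ===== PRECONDITION & SPEC =====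
def Spec_solution (num_list : List Int) (out : Int) : Prop := out = solution_alt num_list
instance (num_list : List Int) (out : Int) : Decidable (Spec_solution num_list out) := by unfold Spec_solution; infer_instance

-- ===== CLAIM (what is proved, stated in full; the proofs are below) =====
def Claim_equal_solution : Prop := ∀ (num_list : List Int), Dom_solution num_list → Spec_solution num_list (solution num_list)

-- ===== LEMMAS AND PROOFS =====

-- elements at even / odd indices (proof helpers)
def pvEvens : List Int → List Int
  | [] => []
  | [x] => [x]
  | x :: _ :: xs => x :: pvEvens xs

def pvOdds : List Int → List Int
  | [] => []
  | [_] => []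
  | _ :: y :: xs => y :: pvOdds xs

theorem pv_cons (xs : List Int) :
    (∀ x, pvEvens (x :: xs) = x :: pvOdds xs) ∧ (∀ x, pvOdds (x :: xs) = pvEvens xs) := by
  induction xs using pvEvens.induct with
  | case1 => simp [pvEvens, pvOdds]
  | case2 y => simp [pvEvens, pvOdds]
  | case3 y z xs ih => exact ⟨fun x => by simp [pvEvens, pvOdds, ih.1], fun x => by simp [pvEvens, pvOdds, ih.2]⟩

theorem evens_aux (xs : List Int) :
    List.filterMap (fun k => xs[((2:Int) * ↑k).toNat]?) (List.range (((xs.length:Int) + 1) / 2).toNat) = pvEvens xs := by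
  induction xs using pvEvens.induct with
  | case1 => simp [pvEvens]
  | case2 x => simp [pvEvens]
  | case3 x y xs ih =>
    have hc : ((((x :: y :: xs).length : Int) + 1) / 2).toNat = (((xs.length : Int) + 1) / 2).toNat + 1 := by
      simp; omega
    rw [hc, List.range_succ_eq_map, List.filterMap_cons, List.filterMap_map]
    simp only [pvEvens]
    have hf : ∀ k : Nat, (x :: y :: xs)[((2:Int) * ((k:Int) + 1)).toNat]? = xs[((2:Int) * (k:Int)).toNat]? := by
      intro k
      have h2 : ((2:Int) * ((k:Int) + 1)).toNat = ((2:Int) * (k:Int)).toNat + 2 := by omega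
      simp [h2]
    simp only [Function.comp_def]
    simp [hf, ih]

theorem odds_aux (xs : List Int) :
    List.filterMap (fun k => xs[((1:Int) + 2 * ↑k).toNat]?) (List.range (((xs.length:Int)) / 2).toNat) = pvOdds xs := by
  induction xs using pvOdds.induct with
  | case1 => simp [pvOdds]
  | case2 x => simp [pvOdds]
  | case3 x y xs ih =>
    have hc : (((x :: y :: xs).length : Int) / 2).toNat = (((xs.length : Int)) / 2).toNat + 1 := by
      simp; omega
    rw [hc, List.range_succ_eq_map, List.filterMap_cons, List.filterMap_map]
    simp only [pvOdds]
    have hf : ∀ k : Nat, (x :: y :: xs)[((1:Int) + 2 * ((k:Int) + 1)).toNat]? = xs[((1:Int) + 2 * (k:Int)).toNat]? := by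
      intro k
      have h2 : ((1:Int) + 2 * ((k:Int) + 1)).toNat = ((1:Int) + 2 * (k:Int)).toNat + 2 := by omega
      simp [h2]
    simp only [Function.comp_def]
    simp [hf, ih]

theorem slice?_two (xs : List Int) :
    PySem.List.slice? xs none none 2 = some (pvEvens xs) := by
  rw [← evens_aux xs]
  simp [PySem.List.slice?, PySem.List.sliceIndices]
  have : (if 0 < xs.length then (((xs.length:Int) + 2 - 1) / 2).toNat else 0) = (((xs.length:Int) + 1) / 2).toNat := by
    split <;> omega
  rw [this]

theorem slice?_one_two (xs : List Int) :
    PySem.List.slice? xs (some 1) none 2 = some (pvOdds xs) := by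
  rw [← odds_aux xs]
  rcases xs with _ | ⟨x, xs⟩
  · simp [PySem.List.slice?, PySem.List.sliceIndices]
  · simp [PySem.List.slice?, PySem.List.sliceIndices]
    have hcnt : (if 0 < xs.length then (((xs.length : Int) + 2 - 1) / 2).toNat else 0)
        = (((xs.length : Int) + 1) / 2).toNat := by
      split <;> omega
    rw [hcnt]

theorem foldl_parity (xs : List Int) : ∀ o e : Int,
    ((xs.foldl (fun (s : Int × Int × Int) i =>
        if s.1 == 1 then (2, s.2.1 + i, s.2.2) else (1, s.2.1, s.2.2 + i)) (1, o, e)).2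
      = (o + (pvEvens xs).sum, e + (pvOdds xs).sum))
  ∧ ((xs.foldl (fun (s : Int × Int × Int) i =>
        if s.1 == 1 then (2, s.2.1 + i, s.2.2) else (1, s.2.1, s.2.2 + i)) (2, o, e)).2
      = (o + (pvOdds xs).sum, e + (pvEvens xs).sum)) := by
  induction xs with
  | nil => intro o e; simp [pvEvens, pvOdds]
  | cons x xs ih =>
    intro o e
    constructor
    · simpa [List.foldl, (pv_cons xs).1, (pv_cons xs).2, add_assoc, add_comm, add_left_comm] using (ih (o + x) e).2
    · simpa [List.foldl, (pv_cons xs).1, (pv_cons xs).2, add_assoc, add_comm, add_left_comm] using (ih o (e + x)).1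

-- ===== VERDICT (by name: the statement is the Claim_ definition above) =====
theorem solution_spec : Claim_equal_solution := by
  intro xs _
  unfold Spec_solution solution solution_alt
  rw [slice?_two, slice?_one_two]
  have h := (foldl_parity xs 0 0).1
  simp only [Option.getD_some]
  rw [Prod.ext_iff] at h
  rw [h.1, h.2]
  simp
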